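-- pv_equiv track=rewrite | github.com/benpodraza/codecritic | app/utils/metadata/footer/footer_annotation_helper.py | strip_metadata_footer
-- ===== SOURCE A (Python) =====
-- from typing import List
--
-- FOOTER_HEADER = "# === AI-FIRST METADATA ==="
--
-- def strip_metadata_footer(code: str) -> tuple[str, List[str]]:
--     """
--     Remove all AI-FIRST METADATA footer blocks from a code string.
--
--     Returns:
--         (stripped_code, footer_lines)
--     """
--     lines = code.strip().splitlines()
--     cutoff = len(lines)
--
--     for i in reversed(range(len(lines))):
--         if lines[i].startswith(FOOTER_HEADER):
--             cutoff = i
--         elif lines[i].startswith("#") and i > 0 and lines[i - 1].startswith(FOOTER_HEADER):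
--             continue
--         else:
--             break
--
--     stripped = lines[:cutoff]
--     footers = lines[cutoff:]
--     return "\n".join(stripped).strip(), footers
-- ===== SOURCE B (Python) =====
-- from typing import List
--
-- FOOTER_HEADER = "# === AI-FIRST METADATA ==="
--
-- def strip_metadata_footer(code: str) -> tuple[str, List[str]]:
--     """
--     Remove all AI-FIRST METADATA footer blocks from a code string.
--
--     Single forward pass: track the index after the last non-footer-ish line.
--     """
--     lines = code.strip().splitlines()
--     cutoff = 0
--     prev_is_header = False
--     for i, line in enumerate(lines):
--         is_header = line.startswith(FOOTER_HEADER)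
--         footerish = is_header or (line.startswith("#") and i > 0 and prev_is_header)
--         if not footerish:
--             cutoff = i + 1
--         prev_is_header = is_header
--     stripped = lines[:cutoff]
--     footers = lines[cutoff:]
--     return "\n".join(stripped).strip(), footers
-- ===== Notes on version B (the rewrite author's own statement) =====
-- stated objective: alternative
-- what changed: Replaces the reverse break-loop that records the lowest header index with a single forward pass tracking the index after the last non-footer-ish line (carrying a prev-line-is-header flag), then the same slicing/join.
import Mathlib
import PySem

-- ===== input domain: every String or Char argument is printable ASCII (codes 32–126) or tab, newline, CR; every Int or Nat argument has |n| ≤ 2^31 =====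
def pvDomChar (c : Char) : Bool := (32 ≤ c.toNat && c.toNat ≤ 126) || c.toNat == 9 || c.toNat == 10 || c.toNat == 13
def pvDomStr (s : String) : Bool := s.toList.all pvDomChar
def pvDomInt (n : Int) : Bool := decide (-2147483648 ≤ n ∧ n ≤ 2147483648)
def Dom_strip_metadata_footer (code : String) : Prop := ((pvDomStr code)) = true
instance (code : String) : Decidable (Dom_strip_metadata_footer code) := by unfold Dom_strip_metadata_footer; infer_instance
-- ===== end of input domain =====

-- B replaces A's reverse break-loop by one forward pass tracking the last non-footer-ish line (alternative decomposition, same cost).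

def pvFooterHeader : String := "# === AI-FIRST METADATA ==="

-- ===== PORT A =====
-- A's `for i in reversed(range(len(lines)))` with break: counter i+1 examines index i.
def aLoop (lines : List String) : Nat → Nat → Nat
  | 0, cutoff => cutoff
  | i+1, cutoff =>
    if PySem.Str.startswith (lines.getD i "") pvFooterHeader then
      aLoop lines i i
    else if PySem.Str.startswith (lines.getD i "") "#" && decide (0 < i)
            && PySem.Str.startswith (lines.getD (i-1) "") pvFooterHeader then
      aLoop lines i cutoff
    else cutoff

def strip_metadata_footer (code : String) : String × List String :=
  let lines := PySem.Str.splitlines (PySem.Str.strip code)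
  let cutoff := aLoop lines lines.length lines.length
  -- 0 ≤ cutoff ≤ len(lines), so Python's lines[:cutoff] / lines[cutoff:] are take/drop (exact here)
  (PySem.Str.strip (PySem.Str.join "\n" (lines.take cutoff)), lines.drop cutoff)

-- ===== PORT B =====
-- B's `for i, line in enumerate(lines)` body; state = (cutoff, prev_is_header).
def bStep (s : Int × Bool) (p : Int × String) : Int × Bool :=
  let isH := PySem.Str.startswith p.2 pvFooterHeader
  let footerish := isH || (PySem.Str.startswith p.2 "#" && decide ((0:Int) < p.1) && s.2)
  (if footerish then s.1 else p.1 + 1, isH)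

def strip_metadata_footer_alt (code : String) : String × List String :=
  let lines := PySem.Str.splitlines (PySem.Str.strip code)
  let cutoff := (List.foldl bStep (0, false) (PySem.List.enumerate lines 0)).1
  -- cutoff is always nonnegative, so Python's lines[:cutoff] / lines[cutoff:] are take/drop (exact here)
  (PySem.Str.strip (PySem.Str.join "\n" (lines.take cutoff.toNat)), lines.drop cutoff.toNat)

-- ===== PRECONDITION & SPEC =====
def Spec_strip_metadata_footer (code : String) (out : String × List String) : Prop := out = strip_metadata_footer_alt code
instance (code : String) (out : String × List String) : Decidable (Spec_strip_metadata_footer code out) := by unfold Spec_strip_metadata_footer; infer_instance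

-- ===== CLAIM (what is proved, stated in full; the proofs are below) =====
def Claim_equal_strip_metadata_footer : Prop := ∀ (code : String), Dom_strip_metadata_footer code → Spec_strip_metadata_footer code (strip_metadata_footer code)

-- ===== LEMMAS AND PROOFS =====

-- line i starts with the footer header
def hdr (lines : List String) (i : Nat) : Bool :=
  PySem.Str.startswith (lines.getD i "") pvFooterHeader

-- "footer-ish": header line, or '#'-line directly preceded by a header line
def fh (lines : List String) (i : Nat) : Bool :=
  hdr lines i || (PySem.Str.startswith (lines.getD i "") "#" && decide (0 < i) && hdr lines (i-1))

-- forward cutoff: index after the last non-footer-ish line among the first k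
def gcut (lines : List String) : Nat → Nat
  | 0 => 0
  | k+1 => if fh lines k then gcut lines k else k+1

-- lowest header index in [i, n), else n  (A's cutoff invariant)
def hm (lines : List String) (i : Nat) : Nat :=
  if i < lines.length then (if hdr lines i then i else hm lines (i+1)) else lines.length
termination_by lines.length - i

theorem fh_hdr_of_start (lines : List String) (i : Nat)
    (h1 : fh lines i = true) (h2 : i = 0 ∨ fh lines (i-1) = false) : hdr lines i = true := by
  cases hA : hdr lines i with
  | true => rfl
  | false =>
    unfold fh at h1
    rw [hA, Bool.false_or, Bool.and_assoc, Bool.and_eq_true, Bool.and_eq_true] at h1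
    rcases h2 with h2 | h2
    · rw [h2] at h1; simp at h1
    · unfold fh at h2
      rw [h1.2.2] at h2; simp at h2

theorem hm_at_hdr (lines : List String) (i : Nat) (hi : i < lines.length)
    (h : hdr lines i = true) : hm lines i = i := by
  unfold hm; simp [hi, h]

theorem hm_not_hdr (lines : List String) (i : Nat) (hi : i < lines.length)
    (h : hdr lines i = false) : hm lines i = hm lines (i+1) := by
  conv_lhs => unfold hm
  simp [hi, h]

theorem hm_len (lines : List String) : hm lines lines.length = lines.length := by
  unfold hm; simp

theorem gcut_stable (lines : List String) (i : Nat) :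
    ∀ k, i ≤ k → (∀ j, i ≤ j → j < k → fh lines j = true) → gcut lines k = gcut lines i := by
  intro k
  induction k with
  | zero =>
    intro h _
    have : i = 0 := by omega
    simp [this]
  | succ k ih =>
    intro hik hall
    by_cases hk : i ≤ k
    · have hfk : fh lines k = true := hall k hk (by omega)
      simp only [gcut, hfk, if_true]
      exact ih hk (fun j hj1 hj2 => hall j hj1 (by omega))
    · have : i = k + 1 := by omega
      simp [this]

theorem fh_false_parts (lines : List String) (i : Nat) (h : fh lines i = false) :
    hdr lines i = false ∧
      (PySem.Str.startswith (lines.getD i "") "#" && decide (0 < i) && hdr lines (i-1)) = false := by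
  unfold fh at h
  exact Bool.or_eq_false_iff.mp h

theorem aLoop_eq_gcut (lines : List String) :
    ∀ i cutoff, i ≤ lines.length →
      (∀ j, i ≤ j → j < lines.length → fh lines j = true) →
      cutoff = hm lines i →
      aLoop lines i cutoff = gcut lines lines.length := by
  intro i
  induction i with
  | zero =>
    intro cutoff _ hall hc
    have hg : gcut lines lines.length = gcut lines 0 :=
      gcut_stable lines 0 lines.length (Nat.zero_le _) (fun j _ hj => hall j (Nat.zero_le _) hj)
    rcases Nat.eq_zero_or_pos lines.length with h0 | h0
    · simp [aLoop, hc, gcut, hm, h0]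
    · have hh : hdr lines 0 = true :=
        fh_hdr_of_start lines 0 (hall 0 (le_refl _) h0) (Or.inl rfl)
      simp [aLoop, hc, hg, gcut, hm_at_hdr lines 0 h0 hh]
  | succ i ih =>
    intro cutoff hlen hall hc
    have hi : i < lines.length := by omega
    simp only [aLoop]
    by_cases hfh : fh lines i = true
    · -- the loop continues past index i
      have hall' : ∀ j, i ≤ j → j < lines.length → fh lines j = true := by
        intro j hj1 hj2
        rcases Nat.eq_or_lt_of_le hj1 with h | h
        · exact h ▸ hfh
        · exact hall j h hj2
      cases hh : hdr lines i with
      | true =>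
        rw [if_pos (by unfold hdr at hh; exact hh)]
        exact ih i (by omega) hall' (hm_at_hdr lines i hi hh).symm
      | false =>
        have hb2 : (PySem.Str.startswith (lines.getD i "") "#" && decide (0 < i)
            && PySem.Str.startswith (lines.getD (i-1) "") pvFooterHeader) = true := by
          unfold fh at hfh
          rw [hh, Bool.false_or] at hfh
          unfold hdr at hfh
          exact hfh
        rw [if_neg (by unfold hdr at hh; simp only [hh]; exact Bool.false_ne_true), if_pos hb2]
        refine ih cutoff (by omega) hall' ?_
        rw [hc, hm_not_hdr lines i hi hh]
    · -- break at index i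
      have hfh' : fh lines i = false := by simpa using hfh
      obtain ⟨hA, hB⟩ := fh_false_parts lines i hfh'
      rw [if_neg (by unfold hdr at hA; simp only [hA]; exact Bool.false_ne_true),
        if_neg (by unfold hdr at hB; simp only [hB]; exact Bool.false_ne_true)]
      rw [hc]
      have hg : gcut lines lines.length = gcut lines (i+1) :=
        gcut_stable lines (i+1) lines.length hlen hall
      have hgi : gcut lines (i+1) = i + 1 := by simp [gcut, hfh']
      rcases Nat.eq_or_lt_of_le hlen with hn | hn
      · rw [hg, hgi, hn, hm_len]
      · have hh1 : hdr lines (i+1) = true :=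
          fh_hdr_of_start lines (i+1) (hall (i+1) (le_refl _) hn)
            (Or.inr (by simpa using hfh'))
        rw [hg, hgi, hm_at_hdr lines (i+1) hn hh1]

theorem bfold_eq_gcut (lines : List String) :
    ∀ (l : List String) (k : Nat) (c : Int) (p : Bool),
      l = lines.drop k → k ≤ lines.length →
      p = (decide (0 < k) && hdr lines (k-1)) →
      c = (gcut lines k : Int) →
      (List.foldl bStep (c, p) (PySem.List.enumerate l k)).1 = (gcut lines lines.length : Int) := by
  intro l
  induction l with
  | nil =>
    intro k c p hl hk _ hc
    have hle : lines.length ≤ k := List.drop_eq_nil_iff.mp hl.symm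
    have hkn : k = lines.length := by omega
    simp [PySem.List.enumerate, hc, hkn]
  | cons x rest ih =>
    intro k c p hl hk hp hc
    have hkn : k < lines.length := by
      by_contra h
      have hnil : lines.drop k = [] := List.drop_eq_nil_of_le (by omega)
      rw [hnil] at hl
      exact List.cons_ne_nil x rest hl
    have h1 : lines[k]? = some x := by
      rw [← List.head?_drop, ← hl]; rfl
    have hx : x = lines.getD k "" := by
      simp [List.getD_eq_getElem?_getD, h1]
    have hrest : rest = lines.drop (k+1) := by
      have h2 : rest = (lines.drop k).drop 1 := by rw [← hl]; rfl
      rw [h2, List.drop_drop]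
    rw [PySem.List.enumerate_cons, List.foldl_cons]
    have hstep : bStep (c, p) ((k : Int), x) = ((gcut lines (k+1) : Int),
        (decide (0 < k+1) && hdr lines k)) := by
      unfold bStep
      subst hx hp hc
      have hk0 : decide ((0:Int) < (k:Nat)) = decide (0 < k) := by simp
      simp only [hk0, hdr, Prod.mk.injEq]
      constructor
      · have hcond : (PySem.Str.startswith (lines.getD k "") pvFooterHeader
            || (PySem.Str.startswith (lines.getD k "") "#" && decide (0 < k)
              && (decide (0 < k) && PySem.Str.startswith (lines.getD (k-1) "") pvFooterHeader)))
            = fh lines k := by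
          unfold fh hdr
          cases PySem.Str.startswith (lines.getD k "") pvFooterHeader <;>
            cases PySem.Str.startswith (lines.getD k "") "#" <;>
            cases PySem.Str.startswith (lines.getD (k-1) "") pvFooterHeader <;>
            by_cases h0 : 0 < k <;> simp [h0]
        rw [hcond]
        cases hf : fh lines k with
        | true => simp [gcut, hf]
        | false => simp [gcut, hf]
      · simp
    rw [hstep]
    have hcast : (k : Int) + 1 = ((k+1 : Nat) : Int) := by push_cast; ring
    rw [hcast]
    exact ih (k+1) _ _ hrest (by omega) rfl rfl

theorem cutoffs_eq (lines : List String) :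
    aLoop lines lines.length lines.length
      = ((List.foldl bStep (0, false) (PySem.List.enumerate lines 0)).1).toNat := by
  have ha : aLoop lines lines.length lines.length = gcut lines lines.length :=
    aLoop_eq_gcut lines lines.length lines.length (le_refl _)
      (fun j hj1 hj2 => by omega) (hm_len lines).symm
  have hb : (List.foldl bStep (0, false) (PySem.List.enumerate lines 0)).1
      = (gcut lines lines.length : Int) :=
    bfold_eq_gcut lines lines 0 0 false (by simp) (Nat.zero_le _) (by simp) (by simp [gcut])
  rw [ha, hb]
  simp

-- ===== VERDICT (by name: the statement is the Claim_ definition above) =====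
theorem strip_metadata_footer_spec : Claim_equal_strip_metadata_footer := by
  intro code _
  unfold Spec_strip_metadata_footer
  simp only [strip_metadata_footer, strip_metadata_footer_alt]
  rw [cutoffs_eq]
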